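-- pv_equiv track=rewrite | github.com/An2ans/TFM | tasks/Transform/transform_date.py | _build_strptime_format
-- ===== SOURCE A (Python) =====
-- def _build_strptime_format(date_format: str) -> str:
--     """
--     Traduce un patrón tipo 'DDMMYYYY' a un formato strptime '%d%m%Y',
--     reconociendo los tokens 'YYYY', 'MM', 'DD' en ese orden.
--     Cualquier otro carácter se copia tal cual.
--     """
--     i = 0
--     fmt = ""
--     while i < len(date_format):
--         if date_format.startswith("YYYY", i):
--             fmt += "%Y"
--             i += 4
--         elif date_format.startswith("YY", i):
--             fmt += "%y"
--             i += 2
--         elif date_format.startswith("MM", i):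
--             fmt += "%m"
--             i += 2
--         elif date_format.startswith("DD", i):
--             fmt += "%d"
--             i += 2
--         else:
--             # Copiamos cualquier separador literal ('-', '/', etc.)
--             fmt += date_format[i]
--             i += 1
--     return fmt
-- ===== SOURCE B (Python) =====
-- import re
--
-- _TOKEN_MAP = {"YYYY": "%Y", "YY": "%y", "MM": "%m", "DD": "%d"}
-- _TOKEN_RE = re.compile(r"YYYY|YY|MM|DD")
--
--
-- def _build_strptime_format(date_format: str) -> str:
--     return _TOKEN_RE.sub(lambda m: _TOKEN_MAP[m.group()], date_format)
-- ===== Notes on version B (the rewrite author's own statement) =====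
-- stated objective: idiomatic
-- what changed: Replaced the hand-written index/while loop with explicit startswith chains and string += accumulation by a single re.sub over a precompiled token alternation with a dict-backed replacement function.
import Mathlib
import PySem

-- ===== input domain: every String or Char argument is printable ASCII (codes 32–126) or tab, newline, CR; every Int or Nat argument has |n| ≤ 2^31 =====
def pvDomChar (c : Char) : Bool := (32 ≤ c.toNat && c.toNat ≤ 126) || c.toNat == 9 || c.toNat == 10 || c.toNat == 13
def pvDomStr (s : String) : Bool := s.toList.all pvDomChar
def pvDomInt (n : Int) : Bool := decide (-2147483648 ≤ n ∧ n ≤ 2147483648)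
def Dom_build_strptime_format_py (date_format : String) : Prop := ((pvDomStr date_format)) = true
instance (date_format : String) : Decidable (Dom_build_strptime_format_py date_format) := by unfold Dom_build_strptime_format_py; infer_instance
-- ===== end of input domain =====

-- B replaces A's index/while loop of startswith chains by a regex-style substitution
-- driven by a token table (idiomatic re.sub in Python); return values proved equal.

-- ===== PORT A =====
-- A's while loop: position i is represented by the not-yet-consumed suffix,
-- fmt is the accumulator string; branch order exactly as in the Python.
def pvALoop (fmt : List Char) (rest : List Char) : List Char :=
  match rest with
  | [] => fmt
  | c :: cs =>
    if List.isPrefixOf ['Y','Y','Y','Y'] (c :: cs) then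
      pvALoop (fmt ++ ['%','Y']) ((c :: cs).drop 4)
    else if List.isPrefixOf ['Y','Y'] (c :: cs) then
      pvALoop (fmt ++ ['%','y']) ((c :: cs).drop 2)
    else if List.isPrefixOf ['M','M'] (c :: cs) then
      pvALoop (fmt ++ ['%','m']) ((c :: cs).drop 2)
    else if List.isPrefixOf ['D','D'] (c :: cs) then
      pvALoop (fmt ++ ['%','d']) ((c :: cs).drop 2)
    else
      pvALoop (fmt ++ [c]) cs
termination_by rest.length
decreasing_by all_goals simp [List.length_drop]

def build_strptime_format_py (date_format : String) : String :=
  String.ofList (pvALoop [] date_format.toList)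

-- ===== PORT B =====
-- Source B's token table (dict + compiled alternation 'YYYY|YY|MM|DD', longest first)
def pvTokens : List (List Char × List Char) :=
  [(['Y','Y','Y','Y'], ['%','Y']), (['Y','Y'], ['%','y']),
   (['M','M'], ['%','m']), (['D','D'], ['%','d'])]

-- re.sub: scan left to right; at each position the first alternative that
-- matches is replaced, otherwise the character passes through unchanged.
def pvSub (s : List Char) : List Char :=
  match s with
  | [] => []
  | c :: cs =>
    match pvTokens.find? (fun t => List.isPrefixOf t.1 (c :: cs)) with
    | some (pat, rep) => rep ++ pvSub (cs.drop (pat.length - 1))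
    | none => c :: pvSub cs
termination_by s.length
decreasing_by all_goals simp [List.length_drop] <;> omega

def build_strptime_format_py_alt (date_format : String) : String :=
  String.ofList (pvSub date_format.toList)

-- ===== PRECONDITION & SPEC =====
def Spec_build_strptime_format_py (date_format : String) (out : String) : Prop := out = build_strptime_format_py_alt date_format
instance (date_format : String) (out : String) : Decidable (Spec_build_strptime_format_py date_format out) := by unfold Spec_build_strptime_format_py; infer_instance

-- ===== CLAIM (what is proved, stated in full; the proofs are below) =====
def Claim_equal_build_strptime_format_py : Prop := ∀ (date_format : String), Dom_build_strptime_format_py date_format → Spec_build_strptime_format_py date_format (build_strptime_format_py date_format)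

-- ===== LEMMAS AND PROOFS =====

theorem pvALoop_eq_append_pvSub (fmt rest : List Char) :
    pvALoop fmt rest = fmt ++ pvSub rest := by
  induction fmt, rest using pvALoop.induct with
  | case1 => simp [pvALoop, pvSub]
  | case2 fmt c cs h ih =>
    rw [pvALoop]; simp only [h, if_true]
    rw [ih, pvSub]; simp [pvTokens, List.find?, *]
  | case3 fmt c cs h1 h2 ih =>
    rw [pvALoop]; simp only [h1, h2, if_true, if_false]
    rw [ih, pvSub]; simp [pvTokens, List.find?, *]
  | case4 fmt c cs h1 h2 h3 ih =>
    rw [pvALoop]; simp only [h1, h2, h3, if_true, if_false]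
    rw [ih, pvSub]; simp [pvTokens, List.find?, *]
  | case5 fmt c cs h1 h2 h3 h4 ih =>
    rw [pvALoop]; simp only [h1, h2, h3, h4, if_true, if_false]
    rw [ih, pvSub]; simp [pvTokens, List.find?, *]
  | case6 fmt c cs h1 h2 h3 h4 ih =>
    rw [pvALoop]; simp only [h1, h2, h3, h4, if_false]
    rw [ih, pvSub]; simp [pvTokens, List.find?, *]

-- ===== VERDICT (by name: the statement is the Claim_ definition above) =====
theorem build_strptime_format_py_spec : Claim_equal_build_strptime_format_py := by
  intro s _
  unfold Spec_build_strptime_format_py build_strptime_format_py build_strptime_format_py_alt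
  rw [pvALoop_eq_append_pvSub]
  simp
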